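-- pv_equiv track=rewrite | github.com/ruiXinWu/Job-Dashboard | Scraping.py | findLargestYearFromDescription
-- ===== SOURCE A (Python) =====
-- def findLargestYearFromWord(text):
--     ls = list()
--     for w in text.split():
--         try:
--             ls.append(int(w))
--         except:
--             pass
--     try:
--         return max(ls)
--     except:
--         return -1
--
-- def findLargestYearFromDescription(text):
--     j = 0
--     for i in text:
--         cur = findLargestYearFromWord(i)
--         if cur != -1 and cur > j:
--             j = cur
--     if(j != 0):
--         return j
--     else:
--         return None
-- ===== SOURCE B (Python) =====
-- def findLargestYearFromDescription(text):
--     vals = []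
--     for s in text:
--         for w in s.split():
--             try:
--                 vals.append(int(w))
--             except ValueError:
--                 pass
--     positives = [n for n in vals if n > 0]
--     return max(positives) if positives else None
-- ===== Notes on version B (the rewrite author's own statement) =====
-- stated objective: simpler
-- what changed: B flattens all strings into one list of parsed ints, filters the positives, and takes a single max-with-default, removing A's per-string helper, its -1 sentinel, the per-string max() call and the running-max conditional update.
import Mathlib
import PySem

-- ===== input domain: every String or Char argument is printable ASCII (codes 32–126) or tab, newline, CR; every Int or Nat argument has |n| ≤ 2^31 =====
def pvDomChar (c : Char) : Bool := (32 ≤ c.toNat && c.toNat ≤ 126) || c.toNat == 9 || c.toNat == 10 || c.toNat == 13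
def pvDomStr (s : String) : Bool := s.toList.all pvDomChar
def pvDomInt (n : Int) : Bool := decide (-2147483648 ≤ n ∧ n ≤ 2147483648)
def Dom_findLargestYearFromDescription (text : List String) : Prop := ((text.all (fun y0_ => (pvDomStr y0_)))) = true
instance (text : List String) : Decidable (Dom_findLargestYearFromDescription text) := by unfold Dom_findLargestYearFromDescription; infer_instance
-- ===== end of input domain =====

-- B flattens all parsed ints into one list, filters positives, and takes a single max (simpler: no sentinel, no running max).

-- ===== PORT A =====
def findLargestYearFromWord (text : String) : Int :=
  let ls := (PySem.Str.split₀ text).foldl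
    (fun ls w => match PySem.Int.ofStr? w with
      | some n => ls ++ [n]
      | none => ls) []
  match PySem.List.max? ls (fun x => x) with
  | some m => m
  | none => -1

def findLargestYearFromDescription (text : List String) : Option Int :=
  let j := text.foldl
    (fun j i =>
      let cur := findLargestYearFromWord i
      if cur ≠ -1 ∧ cur > j then cur else j) 0
  if j ≠ 0 then some j else none

-- ===== PORT B =====
def findLargestYearFromDescription_alt (text : List String) : Option Int :=
  let vals := text.foldl
    (fun vs s => (PySem.Str.split₀ s).foldl
      (fun vs w => match PySem.Int.ofStr? w with
        | some n => vs ++ [n]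
        | none => vs) vs) []
  let positives := vals.filter (fun n => decide (0 < n))
  match positives with
  | [] => none
  | _ :: _ => PySem.List.max? positives (fun x => x)

-- ===== PRECONDITION & SPEC =====
def Spec_findLargestYearFromDescription (text : List String) (out : Option Int) : Prop := out = findLargestYearFromDescription_alt text
instance (text : List String) (out : Option Int) : Decidable (Spec_findLargestYearFromDescription text out) := by unfold Spec_findLargestYearFromDescription; infer_instance

-- ===== CLAIM (what is proved, stated in full; the proofs are below) =====
def Claim_equal_findLargestYearFromDescription : Prop := ∀ (text : List String), Dom_findLargestYearFromDescription text → Spec_findLargestYearFromDescription text (findLargestYearFromDescription text)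

-- ===== LEMMAS AND PROOFS =====

-- parsed ints of one string
def pvInts (s : String) : List Int := (PySem.Str.split₀ s).filterMap PySem.Int.ofStr?

lemma pv_innerFold (ws : List String) : ∀ acc : List Int,
    ws.foldl (fun vs w => match PySem.Int.ofStr? w with
        | some n => vs ++ [n]
        | none => vs) acc = acc ++ ws.filterMap PySem.Int.ofStr? := by
  induction ws with
  | nil => simp
  | cons w ws ih =>
    intro acc
    simp only [List.foldl_cons, List.filterMap_cons]
    cases h : PySem.Int.ofStr? w with
    | none => simp [ih]
    | some n => simp [ih]

lemma pv_valsFold (text : List String) : ∀ acc : List Int,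
    text.foldl (fun vs s => (PySem.Str.split₀ s).foldl
      (fun vs w => match PySem.Int.ofStr? w with
        | some n => vs ++ [n]
        | none => vs) vs) acc = acc ++ text.flatMap pvInts := by
  induction text with
  | nil => simp
  | cons s rest ih =>
    intro acc
    rw [List.foldl_cons, ih, pv_innerFold]
    simp [pvInts, List.append_assoc]

lemma pv_foldl_max_le {l : List Int} {j : Int} (h : ∀ x ∈ l, x ≤ j) : l.foldl max j = j := by
  induction l generalizing j with
  | nil => rfl
  | cons x t ih =>
    simp only [List.foldl_cons]
    have hx : x ≤ j := h x (by simp)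
    rw [max_eq_left hx]
    exact ih fun y hy => h y (by simp [hy])

lemma pv_le_foldl_max (l : List Int) (j : Int) : j ≤ l.foldl max j := by
  induction l generalizing j with
  | nil => exact le_refl _
  | cons x t ih => exact le_trans (le_max_left j x) (ih (max j x))

lemma pv_foldl_max_mono {l : List Int} {j m : Int} (hj : j ≤ m) (h : ∀ x ∈ l, x ≤ m) :
    l.foldl max j ≤ m := by
  induction l generalizing j with
  | nil => exact hj
  | cons x t ih =>
    exact ih (max_le hj (h x (by simp))) (fun y hy => h y (by simp [hy]))

lemma pv_foldl_max_mem_le {l : List Int} {j x : Int} (hx : x ∈ l) : x ≤ l.foldl max j := by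
  induction l generalizing j with
  | nil => cases hx
  | cons y t ih =>
    rcases List.mem_cons.mp hx with rfl | h
    · exact le_trans (le_max_right j x) (pv_le_foldl_max t _)
    · exact ih h

lemma pv_word_eq (s : String) :
    findLargestYearFromWord s
      = match PySem.List.max? (pvInts s) (fun x => x) with
        | some m => m
        | none => -1 := by
  simp only [findLargestYearFromWord, pv_innerFold, List.nil_append, pvInts]

-- one step of A's running max equals folding max over the positives of that string
lemma pv_step (s : String) (j : Int) (hj : 0 ≤ j) :
    (if findLargestYearFromWord s ≠ -1 ∧ findLargestYearFromWord s > j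
       then findLargestYearFromWord s else j)
      = ((pvInts s).filter (fun n => decide (0 < n))).foldl max j := by
  rw [pv_word_eq]
  cases hm : PySem.List.max? (pvInts s) (fun x => x) with
  | none =>
    have h0 : pvInts s = [] := (PySem.List.max?_eq_none_iff _ _).mp hm
    simp [h0]
  | some m =>
    have hmem : m ∈ pvInts s := PySem.List.max?_mem hm
    have hmax : ∀ y ∈ pvInts s, y ≤ m := fun y hy => PySem.List.max?_isMax hm y hy
    show (if m ≠ -1 ∧ m > j then m else j)
      = ((pvInts s).filter (fun n => decide (0 < n))).foldl max j
    by_cases hgt : m > j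
    · have hm0 : (0:Int) < m := lt_of_le_of_lt hj hgt
      have hne : m ≠ -1 := by omega
      rw [if_pos ⟨hne, hgt⟩]
      have hmf : m ∈ (pvInts s).filter (fun n => decide (0 < n)) := by
        simp [List.mem_filter, hmem, hm0]
      have h1 : m ≤ ((pvInts s).filter (fun n => decide (0 < n))).foldl max j :=
        pv_foldl_max_mem_le hmf
      have h2 : ((pvInts s).filter (fun n => decide (0 < n))).foldl max j ≤ m := by
        refine pv_foldl_max_mono (le_of_lt hgt) ?_
        intro y hy
        exact hmax y (List.mem_of_mem_filter hy)
      omega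
    · rw [if_neg (by rintro ⟨-, h2⟩; exact hgt h2)]
      symm
      refine pv_foldl_max_le ?_
      intro x hx
      exact le_trans (hmax x (List.mem_of_mem_filter hx)) (not_lt.mp hgt)

-- A's fold over the strings equals folding max over all positives of the flattened list
lemma pv_mainFold (text : List String) : ∀ j : Int, 0 ≤ j →
    text.foldl (fun j i =>
      let cur := findLargestYearFromWord i
      if cur ≠ -1 ∧ cur > j then cur else j) j
      = ((text.flatMap pvInts).filter (fun n => decide (0 < n))).foldl max j := by
  induction text with
  | nil => intro j _; rfl
  | cons s rest ih =>
    intro j hj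
    simp only [List.foldl_cons, List.flatMap_cons, List.filter_append, List.foldl_append]
    rw [show (let cur := findLargestYearFromWord s;
        if cur ≠ -1 ∧ cur > j then cur else j)
        = ((pvInts s).filter (fun n => decide (0 < n))).foldl max j from pv_step s j hj]
    exact ih _ (le_trans hj (pv_le_foldl_max _ _))

-- ===== VERDICT (by name: the statement is the Claim_ definition above) =====
theorem findLargestYearFromDescription_spec : Claim_equal_findLargestYearFromDescription := by
  intro text _
  unfold Spec_findLargestYearFromDescription findLargestYearFromDescription findLargestYearFromDescription_alt
  simp only [pv_valsFold, List.nil_append]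
  rw [pv_mainFold text 0 le_rfl]
  cases hL : (text.flatMap pvInts).filter (fun n => decide (0 < n)) with
  | nil => simp
  | cons x t =>
    have hx0 : (0:Int) < x := by
      have : x ∈ (text.flatMap pvInts).filter (fun n => decide (0 < n)) := by simp [hL]
      simpa using (List.mem_filter.mp this).2
    rw [PySem.List.max?_id_cons]
    simp only [List.foldl_cons, max_eq_right (le_of_lt hx0)]
    have hpos : (0:Int) < t.foldl max x := lt_of_lt_of_le hx0 (pv_le_foldl_max t x)
    rw [if_pos (by omega)]
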